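-- pv_equiv track=rewrite | github.com/boisvert42/npr-puzzle-python | rhyme.py | rhyming_part
-- ===== SOURCE A (Python) =====
-- def rhyming_part(pron):
--     '''
--     Return the "rhyming part" of a pronunciation
--
--     This is defined as everything from the first stressed syllable on
--     The result will be a list of lists; the rhyming part for each pronunciation
--     '''
--     stress_numbers = ['1','2','0']
--     for num in stress_numbers:
--         if num in ''.join(pron):
--             for i in range(len(pron)):
--                  if num in pron[i]:
--                     return pron[i:]
--     # In case somehow we missed something
--     return None
-- ===== SOURCE B (Python) =====
-- def rhyming_part(pron):
--     '''
--     Return the "rhyming part" of a pronunciation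
--
--     This is defined as everything from the first stressed syllable on
--     '''
--     markers = ['1', '2', '0']
--     best_rank = None
--     best_index = None
--     for i, syll in enumerate(pron):
--         rank = None
--         for r, m in enumerate(markers):
--             if m in syll:
--                 rank = r
--                 break
--         if rank is not None and (best_rank is None or rank < best_rank):
--             best_rank = rank
--             best_index = i
--     if best_index is None:
--         return None
--     return pron[best_index:]
-- ===== Notes on version B (the rewrite author's own statement) =====
-- stated objective: alternative
-- what changed: Replaced A's three-priority multi-scan (join the whole list and rescan it once per stress marker) with a single left-to-right pass that ranks each syllable by the first marker it contains and keeps the best rank with its earliest index.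
import Mathlib
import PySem

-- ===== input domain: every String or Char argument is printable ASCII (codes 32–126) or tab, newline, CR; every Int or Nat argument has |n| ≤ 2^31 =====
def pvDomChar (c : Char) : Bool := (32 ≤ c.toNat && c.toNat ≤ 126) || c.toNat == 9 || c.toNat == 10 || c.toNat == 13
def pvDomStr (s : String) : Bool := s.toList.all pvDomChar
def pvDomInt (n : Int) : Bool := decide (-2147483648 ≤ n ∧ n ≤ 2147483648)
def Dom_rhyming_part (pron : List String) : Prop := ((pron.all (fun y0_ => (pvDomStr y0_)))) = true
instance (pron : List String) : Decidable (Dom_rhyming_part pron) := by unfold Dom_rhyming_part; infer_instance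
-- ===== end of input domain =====

-- B replaces A's three-priority multi-scan (join + rescan per marker) with one left-to-right
-- pass keeping the best (rank, earliest index); objective: alternative single-pass algorithm.

-- ===== PORT A =====
-- inner 'for i in range(len(pron)): if num in pron[i]: return pron[i:]'
def pvAInner (pron : List String) (num : String) : List Int → Option (List String)
  | [] => none
  | i :: rest =>
    if PySem.Str.isIn num (PySem.List.pyGetD pron i "") then
      some (PySem.List.slice pron (some i) none)
    else pvAInner pron num rest

-- outer 'for num in stress_numbers: if num in "".join(pron): …'
def pvAOuter (pron : List String) : List String → Option (List String)
  | [] => none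
  | num :: rest =>
    if PySem.Str.isIn num (PySem.Str.join "" pron) then
      match pvAInner pron num (PySem.List.pyRange 0 (PySem.List.len pron) 1) with
      | some r => some r
      | none => pvAOuter pron rest
    else pvAOuter pron rest

def rhyming_part (pron : List String) : Option (List String) :=
  pvAOuter pron ["1", "2", "0"]

-- ===== PORT B =====
-- 'for r, m in enumerate(markers): if m in syll: rank = r; break'
def pvRankFrom (syll : String) (r : Nat) : List String → Option Nat
  | [] => none
  | m :: rest => if PySem.Str.isIn m syll then some r else pvRankFrom syll (r + 1) rest

-- the body of 'if rank is not None and (best_rank is None or rank < best_rank): …'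
def pvBUpd (best : Option (Nat × Nat)) (rank : Option Nat) (i : Nat) : Option (Nat × Nat) :=
  match rank, best with
  | some r, none => some (r, i)
  | some r, some (br, bi) => if r < br then some (r, i) else some (br, bi)
  | none, b => b

-- 'for i, syll in enumerate(pron): …'
def pvBLoop : List String → Nat → Option (Nat × Nat) → Option (Nat × Nat)
  | [], _, best => best
  | s :: rest, i, best =>
    pvBLoop rest (i + 1) (pvBUpd best (pvRankFrom s 0 ["1", "2", "0"]) i)

def rhyming_part_alt (pron : List String) : Option (List String) :=
  match pvBLoop pron 0 none with
  | none => none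
  | some (_, bi) => some (PySem.List.slice pron (some (bi : Int)) none)

-- ===== PRECONDITION & SPEC =====
def Spec_rhyming_part (pron : List String) (out : Option (List String)) : Prop := out = rhyming_part_alt pron
instance (pron : List String) (out : Option (List String)) : Decidable (Spec_rhyming_part pron out) := by unfold Spec_rhyming_part; infer_instance

-- ===== CLAIM (what is proved, stated in full; the proofs are below) =====
def Claim_equal_rhyming_part : Prop := ∀ (pron : List String), Dom_rhyming_part pron → Spec_rhyming_part pron (rhyming_part pron)

-- ===== LEMMAS AND PROOFS =====

-- common characterisation: the chosen index, by marker priority then earliest position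
def pvMatch (pron : List String) : Option Nat :=
  match List.findIdx? (fun s => PySem.Str.isIn "1" s) pron with
  | some i => some i
  | none =>
    match List.findIdx? (fun s => PySem.Str.isIn "2" s) pron with
    | some i => some i
    | none =>
      match List.findIdx? (fun s => PySem.Str.isIn "0" s) pron with
      | some i => some i
      | none => none

theorem singleton_infix_iff {α : Type} (c : α) (l : List α) : [c] <:+: l ↔ c ∈ l := by
  constructor
  · intro h
    exact (List.singleton_sublist.mp h.sublist)
  · intro h
    obtain ⟨l1, l2, rfl⟩ := List.append_of_mem h
    exact ⟨l1, l2, by simp⟩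

theorem join_empty_sep : ∀ (ls : List (List Char)), PySem.Chars.join [] ls = ls.flatten
  | [] => PySem.Chars.join_nil []
  | [p] => by simp [PySem.Chars.join_singleton]
  | p :: q :: rest => by
    rw [PySem.Chars.join_cons_cons, join_empty_sep (q :: rest)]
    simp

theorem isIn_single_iff (num : String) (c : Char) (h : num.toList = [c]) (s : String) :
    PySem.Str.isIn num s = true ↔ c ∈ s.toList := by
  rw [PySem.Str.isIn_iff_infix, h, singleton_infix_iff]

theorem isIn_join_iff (num : String) (c : Char) (h : num.toList = [c]) (pron : List String) :
    PySem.Str.isIn num (PySem.Str.join "" pron) = true ↔ ∃ s ∈ pron, c ∈ s.toList := by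
  rw [PySem.Str.isIn_iff_infix, h, singleton_infix_iff, PySem.Str.toList_join]
  have : ("" : String).toList = [] := rfl
  rw [this, join_empty_sep, List.mem_flatten]
  constructor
  · rintro ⟨l, hl, hc⟩
    obtain ⟨s, hs, rfl⟩ := List.mem_map.mp hl
    exact ⟨s, hs, hc⟩
  · rintro ⟨s, hs, hc⟩
    exact ⟨s.toList, List.mem_map.mpr ⟨s, hs, rfl⟩, hc⟩

theorem findIdx?_isSome_iff_exists (p : String → Bool) (l : List String) :
    (List.findIdx? p l).isSome = true ↔ ∃ s ∈ l, p s = true := by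
  simp [List.findIdx?_isSome]

-- the inner index loop of A finds the first syllable from position k on containing num
theorem pvAInner_eq (pron : List String) (num : String) :
    ∀ (k : Nat), k ≤ pron.length →
    pvAInner pron num (PySem.List.pyRange (k : Int) (pron.length : Int) 1) =
      (List.findIdx? (fun s => PySem.Str.isIn num s) (pron.drop k)).map
        (fun j => pron.drop (k + j)) := by
  intro k hk
  induction hn : pron.length - k generalizing k with
  | zero =>
    have hk' : k = pron.length := by omega
    subst hk'
    rw [PySem.List.pyRange_one_eq_nil (by omega)]
    simp [pvAInner]
  | succ n ih =>
    have hlt : k < pron.length := by omega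
    rw [PySem.List.pyRange_one_cons (by exact_mod_cast hlt)]
    have hdrop : pron.drop k = pron[k] :: pron.drop (k + 1) :=
      List.drop_eq_getElem_cons hlt
    have hget : PySem.List.pyGetD pron (k : Int) "" = pron[k] := by
      rw [PySem.List.pyGetD_natCast]
      exact List.getD_eq_getElem _ _ hlt
    simp only [pvAInner, hget]
    by_cases hp : PySem.Str.isIn num pron[k] = true
    · rw [if_pos hp, hdrop]
      rw [List.findIdx?_cons, if_pos hp]
      simp [PySem.List.slice_from_natCast]
    · rw [if_neg hp]
      have : ((k : Int) + 1) = ((k + 1 : Nat) : Int) := by push_cast; ring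
      rw [this, ih (k + 1) (by omega) (by omega)]
      rw [hdrop, List.findIdx?_cons, if_neg hp]
      rcases List.findIdx? (fun s => PySem.Str.isIn num s) (pron.drop (k + 1)) with _ | j
      · simp
      · simp
        omega

-- A's value in terms of pvMatch
theorem rhyming_part_eq_match (pron : List String) :
    rhyming_part pron =
      match pvMatch pron with
      | none => none
      | some i => some (pron.drop i) := by
  have hinner : ∀ (num : String),
      pvAInner pron num (PySem.List.pyRange 0 (PySem.List.len pron) 1) =
        (List.findIdx? (fun s => PySem.Str.isIn num s) pron).map (fun j => pron.drop j) := by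
    intro num
    have h0 : (0 : Int) = ((0 : Nat) : Int) := rfl
    have := pvAInner_eq pron num 0 (Nat.zero_le _)
    simpa [PySem.List.len] using this
  have hjoin : ∀ (num : String) (c : Char), num.toList = [c] →
      (PySem.Str.isIn num (PySem.Str.join "" pron) =
        (List.findIdx? (fun s => PySem.Str.isIn num s) pron).isSome) := by
    intro num c hc
    rcases h : (List.findIdx? (fun s => PySem.Str.isIn num s) pron).isSome with _ | _
    · rw [Bool.eq_false_iff]
      intro habs
      rw [isIn_join_iff num c hc] at habs
      obtain ⟨s, hs, hcs⟩ := habs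
      have hsome : (List.findIdx? (fun s => PySem.Str.isIn num s) pron).isSome = true :=
        (findIdx?_isSome_iff_exists _ _).mpr ⟨s, hs, (isIn_single_iff num c hc s).mpr hcs⟩
      rw [h] at hsome
      cases hsome
    · obtain ⟨s, hs, hp⟩ := (findIdx?_isSome_iff_exists _ _).mp h
      rw [isIn_join_iff num c hc]
      exact ⟨s, hs, (isIn_single_iff num c hc s).mp hp⟩
  have h1 := hjoin "1" '1' rfl
  have h2 := hjoin "2" '2' rfl
  have h0 := hjoin "0" '0' rfl
  simp only [rhyming_part, pvAOuter, pvMatch]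
  rw [h1, h2, h0, hinner "1", hinner "2", hinner "0"]
  rcases hf1 : List.findIdx? (fun s => PySem.Str.isIn "1" s) pron with _ | i1 <;>
    rcases hf2 : List.findIdx? (fun s => PySem.Str.isIn "2" s) pron with _ | i2 <;>
      rcases hf0 : List.findIdx? (fun s => PySem.Str.isIn "0" s) pron with _ | i0 <;>
        simp

-- B's loop as a left-biased merge of per-syllable candidates
def pvMerge : Option (Nat × Nat) → Option (Nat × Nat) → Option (Nat × Nat)
  | b, none => b
  | none, some x => some x
  | some (br, bi), some (r, i) => if r < br then some (r, i) else some (br, bi)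

def pvBest : List String → Nat → Option (Nat × Nat)
  | [], _ => none
  | s :: rest, i =>
    pvMerge ((pvRankFrom s 0 ["1", "2", "0"]).map (fun r => (r, i))) (pvBest rest (i + 1))

theorem pvBUpd_eq_merge (best : Option (Nat × Nat)) (rank : Option Nat) (i : Nat) :
    pvBUpd best rank i = pvMerge best (rank.map (fun r => (r, i))) := by
  rcases rank with _ | r <;> rcases best with _ | ⟨br, bi⟩ <;> rfl

theorem pvMerge_assoc (a b c : Option (Nat × Nat)) :
    pvMerge (pvMerge a b) c = pvMerge a (pvMerge b c) := by
  rcases a with _ | ⟨ar, ai⟩ <;> rcases b with _ | ⟨br, bi⟩ <;> rcases c with _ | ⟨cr, ci⟩ <;>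
    simp only [pvMerge] <;> split_ifs <;>
      first
        | rfl
        | (exfalso; omega)
        | (simp only [pvMerge] <;> (try split_ifs) <;> first | rfl | (exfalso; omega))

theorem pvBLoop_eq_merge : ∀ (l : List String) (i : Nat) (b : Option (Nat × Nat)),
    pvBLoop l i b = pvMerge b (pvBest l i)
  | [], i, b => by rcases b with _ | x <;> rfl
  | s :: rest, i, b => by
    rw [pvBLoop, pvBUpd_eq_merge, pvBLoop_eq_merge rest, pvBest, ← pvMerge_assoc]

theorem pvRankFrom_eq (s : String) :
    pvRankFrom s 0 ["1", "2", "0"] =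
      if PySem.Str.isIn "1" s then some 0
      else if PySem.Str.isIn "2" s then some 1
      else if PySem.Str.isIn "0" s then some 2
      else none := by
  simp only [pvRankFrom]

theorem pvBest_eq : ∀ (l : List String) (i : Nat),
    pvBest l i =
      match List.findIdx? (fun s => PySem.Str.isIn "1" s) l with
      | some j => some (0, i + j)
      | none =>
        match List.findIdx? (fun s => PySem.Str.isIn "2" s) l with
        | some j => some (1, i + j)
        | none =>
          match List.findIdx? (fun s => PySem.Str.isIn "0" s) l with
          | some j => some (2, i + j)
          | none => none
  | [], i => by rfl
  | s :: rest, i => by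
    rw [pvBest, pvBest_eq rest (i + 1), pvRankFrom_eq]
    rcases h1 : PySem.Str.isIn "1" s with _ | _ <;>
      rcases h2 : PySem.Str.isIn "2" s with _ | _ <;>
        rcases h0 : PySem.Str.isIn "0" s with _ | _ <;>
          simp only [List.findIdx?_cons, h1, h2, h0, if_true, if_false, Bool.false_eq_true] <;>
            rcases hf1 : List.findIdx? (fun s => PySem.Str.isIn "1" s) rest with _ | j1 <;>
              rcases hf2 : List.findIdx? (fun s => PySem.Str.isIn "2" s) rest with _ | j2 <;>
                rcases hf0 : List.findIdx? (fun s => PySem.Str.isIn "0" s) rest with _ | j0 <;>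
                  simp [pvMerge] <;> omega

theorem rhyming_part_alt_eq_match (pron : List String) :
    rhyming_part_alt pron =
      match pvMatch pron with
      | none => none
      | some i => some (pron.drop i) := by
  unfold rhyming_part_alt
  rw [pvBLoop_eq_merge, pvBest_eq]
  have hm : ∀ x, pvMerge none x = x := by rintro (_ | x) <;> rfl
  unfold pvMatch
  rcases hf1 : List.findIdx? (fun s => PySem.Str.isIn "1" s) pron with _ | i1 <;>
    rcases hf2 : List.findIdx? (fun s => PySem.Str.isIn "2" s) pron with _ | i2 <;>
      rcases hf0 : List.findIdx? (fun s => PySem.Str.isIn "0" s) pron with _ | i0 <;>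
        simp [hm, PySem.List.slice_from_natCast]

-- ===== VERDICT (by name: the statement is the Claim_ definition above) =====
theorem rhyming_part_spec : Claim_equal_rhyming_part := by
  intro pron _
  unfold Spec_rhyming_part
  rw [rhyming_part_eq_match, rhyming_part_alt_eq_match]
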